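-- pv_equiv track=rewrite | github.com/bbriano/mit6.01 | lec2.py | find_sequence_oo
-- ===== SOURCE A (Python) =====
-- from collections import deque
--
-- class Node:
--     def __init__(self, value: int, operation="", parent=None) -> None:
--         self.value = value
--         self.operation = operation
--         self.parent = parent
--
-- def find_sequence_oo(initial: int, goal: int) -> None:
--     q = deque([Node(initial)])
--
--     # On each level for each node, create "inc" and "sqr" child nodes
--     # and halt if reached goal value.
--     while q:
--         n = q.popleft()
--         if n.value == goal:
--             node = n
--             break
--         q.append(Node(n.value+1, "inc", n))
--         q.append(Node(n.value**2, "sqr", n))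
--
--     # Traverse upward from node constructing the operation sequence.
--     res = []
--     while node:
--         res.append(node.operation)
--         node = node.parent
--     return list(reversed(res[:-1]))
-- ===== SOURCE B (Python) =====
-- from collections import deque
--
-- def find_sequence_oo(initial: int, goal: int) -> None:
--     # BFS over VALUES with a visited set and pruning of values past the goal,
--     # instead of A's BFS over an exponentially growing tree of nodes.
--     q = deque([(initial, [])])
--     visited = {initial}
--     while q:
--         value, path = q.popleft()
--         if value == goal:
--             return path
--         for nv, op in ((value + 1, "inc"), (value * value, "sqr")):
--             if nv <= goal and nv not in visited:
--                 visited.add(nv)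
--                 q.append((nv, path + [op]))
--     raise ValueError("goal is not reachable from initial")
-- ===== Notes on version B (the rewrite author's own statement) =====
-- stated objective: alternative
-- what changed: Replaces A's BFS over an exponentially growing tree of parent-linked Node objects (every duplicate value is re-expanded) by a BFS over values with a visited-set dedup and pruning of values past the goal, carrying the operation path in the queue, so each value is expanded at most once.
import Mathlib
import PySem

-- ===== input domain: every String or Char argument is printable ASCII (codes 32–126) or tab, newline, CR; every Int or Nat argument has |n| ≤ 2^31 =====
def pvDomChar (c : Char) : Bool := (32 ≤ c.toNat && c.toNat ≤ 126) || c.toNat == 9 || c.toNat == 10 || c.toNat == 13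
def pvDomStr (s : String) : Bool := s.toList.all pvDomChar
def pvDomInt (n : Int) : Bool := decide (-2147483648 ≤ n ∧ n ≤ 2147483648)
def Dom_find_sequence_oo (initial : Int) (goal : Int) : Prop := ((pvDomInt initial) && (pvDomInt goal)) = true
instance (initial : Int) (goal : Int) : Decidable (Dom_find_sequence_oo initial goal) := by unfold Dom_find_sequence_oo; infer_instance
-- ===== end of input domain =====

-- B replaces A's BFS over an exponentially growing tree of parent-linked nodes by a BFS over
-- VALUES with a visited set and pruning of values past the goal (objective: alternative; it
-- visits each value at most once instead of re-expanding duplicate values).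
-- Both loops are ported with a fuel parameter (pure termination scaffolding; the theorem proves
-- the chosen fuel suffices on Pre_, where each Python loop returns).

-- ===== PORT A =====

-- Python's Node(value, operation, parent): parent=None is the root constructor.
inductive ANode where
  | root (value : Int)
  | child (value : Int) (op : String) (parent : ANode)

def ANode.val : ANode → Int
  | .root v => v
  | .child v _ _ => v

-- the two q.append(Node(...)) calls of one loop iteration, in order
def stepChildren (n : ANode) : List ANode :=
  [ANode.child (n.val + 1) "inc" n, ANode.child (n.val * n.val) "sqr" n]

-- A's `while q:` loop: pop head, halt on goal, else append the two children.
def bfsA (goal : Int) : List ANode → Nat → Option ANode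
  | _, 0 => none
  | [], _ + 1 => none
  | n :: rest, f + 1 =>
    if n.val = goal then some n else bfsA goal (rest ++ stepChildren n) f

-- A's second `while node:` loop: collect node.operation upward (root contributes "").
def collectUp : ANode → List String
  | .root _ => [""]
  | .child _ op p => op :: collectUp p

def find_sequence_oo (initial : Int) (goal : Int) : List String :=
  match bfsA goal [ANode.root initial] (2 ^ (goal - initial).toNat) with
  -- list(reversed(res[:-1])): res = collectUp n is nonempty, so res[:-1] = dropLast
  | some n => (collectUp n).dropLast.reverse
  | none => []  -- fuel exhausted: Python A never terminates here (only when goal < initial); Pre_ excludes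

-- ===== PORT B =====

-- body of B's `for nv, op in ...` loop: enqueue a child if it is ≤ goal and unvisited
def pushB (goal : Int) (p : List String) :
    List (Int × List String) × PySem.Set Int → Int × String →
    List (Int × List String) × PySem.Set Int :=
  fun (q, vis) (nv, op) =>
    if nv ≤ goal ∧ nv ∉ vis then (q ++ [(nv, p ++ [op])], PySem.Set.add vis nv) else (q, vis)

-- B's `while q:` loop over (value, path) pairs with the visited set
def bfsB (goal : Int) : List (Int × List String) → PySem.Set Int → Nat → Option (List String)
  | _, _, 0 => none
  | [], _, _ + 1 => none
  | (v, p) :: rest, vis, f + 1 =>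
    if v = goal then some p
    else
      let r := List.foldl (pushB goal p) (rest, vis) [(v + 1, "inc"), (v * v, "sqr")]
      bfsB goal r.1 r.2 f

def find_sequence_oo_alt (initial : Int) (goal : Int) : List String :=
  match bfsB goal [(initial, [])] (PySem.Set.ofList [initial]) (2 ^ (goal - initial).toNat) with
  | some p => p
  | none => []  -- Python B raises ValueError here (only when goal < initial); Pre_ excludes

-- ===== PRECONDITION & SPEC =====
-- Pre_ excludes goal < initial, where both operations only move the value away from the goal:
-- Python A loops forever and Python B raises ValueError, so neither returns a value.
def Pre_find_sequence_oo (initial : Int) (goal : Int) : Prop := initial ≤ goal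
instance (initial : Int) (goal : Int) : Decidable (Pre_find_sequence_oo initial goal) := by unfold Pre_find_sequence_oo; infer_instance

def pvWitness_find_sequence_oo : Int × Int := (2, 5)

def Spec_find_sequence_oo (initial : Int) (goal : Int) (out : List String) : Prop := out = find_sequence_oo_alt initial goal
instance (initial : Int) (goal : Int) (out : List String) : Decidable (Spec_find_sequence_oo initial goal out) := by unfold Spec_find_sequence_oo; infer_instance

-- ===== CLAIM (what is proved, stated in full; the proofs are below) =====
def Claim_equal_find_sequence_oo : Prop := ∀ (initial : Int) (goal : Int), Dom_find_sequence_oo initial goal → Pre_find_sequence_oo initial goal → Spec_find_sequence_oo initial goal (find_sequence_oo initial goal)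

-- ===== LEMMAS AND PROOFS =====

-- operation sequence of a node, root-to-node
def opsOf : ANode → List String
  | .root _ => []
  | .child _ op p => opsOf p ++ [op]

def toPair (n : ANode) : Int × List String := (n.val, opsOf n)

-- the "dedup + prune" filter: what B's queue keeps from A's queue, given already-seen values E
def keepF (g : Int) : List Int → List (Int × List String) → List (Int × List String)
  | _, [] => []
  | E, (v, p) :: rest =>
    if v ≤ g ∧ v ∉ E then (v, p) :: keepF g (v :: E) rest else keepF g E rest

-- the seen-set state after keepF has scanned the whole list
def endEF (g : Int) : List Int → List (Int × List String) → List Int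
  | E, [] => E
  | E, (v, _) :: rest =>
    if v ≤ g ∧ v ∉ E then endEF g (v :: E) rest else endEF g E rest

theorem keepF_append (g : Int) (l1 l2 : List (Int × List String)) :
    ∀ E, keepF g E (l1 ++ l2) = keepF g E l1 ++ keepF g (endEF g E l1) l2 := by
  induction l1 with
  | nil => intro E; simp [keepF, endEF]
  | cons c rest ih =>
    intro E
    obtain ⟨v, p⟩ := c
    simp only [List.cons_append, keepF, endEF]
    by_cases hc : v ≤ g ∧ v ∉ E
    · rw [if_pos hc, if_pos hc, if_pos hc, ih (v :: E)]; rfl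
    · rw [if_neg hc, if_neg hc, if_neg hc, ih E]

theorem mem_endEF (g : Int) (l : List (Int × List String)) :
    ∀ E (x : Int), x ∈ endEF g E l ↔ x ∈ E ∨ x ∈ (keepF g E l).map Prod.fst := by
  induction l with
  | nil => intro E x; simp [keepF, endEF]
  | cons c rest ih =>
    intro E x
    obtain ⟨v, p⟩ := c
    simp only [keepF, endEF]
    by_cases hc : v ≤ g ∧ v ∉ E
    · rw [if_pos hc, if_pos hc, ih (v :: E)]
      simp only [List.mem_cons, List.map_cons]
      tauto
    · rw [if_neg hc, if_neg hc, ih E]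

theorem endEF_subset (g : Int) (l : List (Int × List String)) :
    ∀ E (x : Int), x ∈ E → x ∈ endEF g E l := by
  induction l with
  | nil => intro E x h; exact h
  | cons c rest ih =>
    intro E x h
    obtain ⟨v, p⟩ := c
    simp only [endEF]
    split
    · exact ih (v :: E) x (List.mem_cons_of_mem _ h)
    · exact ih E x h

theorem mem_endEF_of_le (g : Int) (l : List (Int × List String)) :
    ∀ E (nv : Int) (p : List String), nv ≤ g → (nv, p) ∈ l → nv ∈ endEF g E l := by
  induction l with
  | nil => intro E nv p _ h; simp at h
  | cons c rest ih =>
    intro E nv p hle hmem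
    obtain ⟨v, q⟩ := c
    rcases List.mem_cons.1 hmem with h | h
    · injection h with h1 h2
      subst h1
      simp only [endEF]
      by_cases hc : nv ≤ g ∧ nv ∉ E
      · rw [if_pos hc]; exact endEF_subset g rest (nv :: E) nv List.mem_cons_self
      · rw [if_neg hc]
        exact endEF_subset g rest E nv (by by_contra hne; exact hc ⟨hle, hne⟩)
    · simp only [endEF]
      split
      · exact ih (v :: E) nv p hle h
      · exact ih E nv p hle h

-- arithmetic: past the goal, squaring stays past the goal
theorem overshoot_sqr (g v : Int) (h : g < v) : g < v * v := by
  by_cases hv : v ≤ 0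
  · nlinarith [mul_self_nonneg v]
  · nlinarith

-- simulation invariant between A's node queue and B's (queue, visited) state;
-- D is the (ghost) set of values B has already dequeued
def InvSim (g : Int) (QA : List ANode) (QB : List (Int × List String)) (V D : List Int) : Prop :=
  QB = keepF g D (QA.map toPair) ∧
  (∀ x : Int, x ∈ V ↔ x ∈ D ∨ x ∈ QB.map Prod.fst) ∧
  (∀ v ∈ D, v ≠ g ∧ (g < v + 1 ∨ (v + 1) ∈ V) ∧ (g < v * v ∨ v * v ∈ V))

-- B's child loop computes exactly the keepF filter of the two children
theorem push_keep_list (g : Int) (p : List String) :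
    ∀ (cs : List (Int × String)) (q : List (Int × List String)) (vis E : List Int),
      (∀ x : Int, x ∈ vis ↔ x ∈ E) →
      (List.foldl (pushB g p) (q, vis) cs).1
          = q ++ keepF g E (cs.map (fun c => (c.1, p ++ [c.2]))) ∧
      (∀ x : Int, x ∈ (List.foldl (pushB g p) (q, vis) cs).2
          ↔ x ∈ endEF g E (cs.map (fun c => (c.1, p ++ [c.2])))) := by
  intro cs
  induction cs with
  | nil =>
    intro q vis E h
    exact ⟨by simp [keepF], by simpa [endEF] using h⟩
  | cons c cs ih =>
    intro q vis E h
    obtain ⟨nv, op⟩ := c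
    simp only [List.foldl_cons, List.map_cons, keepF, endEF]
    by_cases hc : nv ≤ g ∧ nv ∉ vis
    · have hcE : nv ≤ g ∧ nv ∉ E := ⟨hc.1, fun hx => hc.2 ((h nv).2 hx)⟩
      rw [if_pos hcE, if_pos hcE]
      have hstep : pushB g p (q, vis) (nv, op)
          = (q ++ [(nv, p ++ [op])], PySem.Set.add vis nv) := by
        simp [pushB, hc]
      rw [hstep]
      have h' : ∀ x : Int, x ∈ PySem.Set.add vis nv ↔ x ∈ nv :: E := by
        intro x
        rw [PySem.Set.mem_add]
        simp [h x, List.mem_cons]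
        tauto
      obtain ⟨h1, h2⟩ := ih (q ++ [(nv, p ++ [op])]) (PySem.Set.add vis nv) (nv :: E) h'
      exact ⟨by rw [h1]; simp, h2⟩
    · have hcE : ¬ (nv ≤ g ∧ nv ∉ E) := by
        intro hx; exact hc ⟨hx.1, fun hv => hx.2 ((h nv).1 hv)⟩
      rw [if_neg hcE, if_neg hcE]
      have hstep : pushB g p (q, vis) (nv, op) = (q, vis) := by
        simp only [pushB]
        rw [if_neg hc]
      rw [hstep]
      exact ih q vis E h

-- the simulation: if A's BFS finds a node, B's BFS finds its operation sequence, in no more steps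
theorem sim (g : Int) :
    ∀ (fA : Nat) (QA : List ANode) (QB : List (Int × List String)) (V D : List Int) (n : ANode),
      InvSim g QA QB V D → bfsA g QA fA = some n →
      ∃ fB ≤ fA, bfsB g QB V fB = some (opsOf n) := by
  intro fA
  induction fA with
  | zero => intro QA QB V D n _ h; simp [bfsA] at h
  | succ f ih =>
    intro QA QB V D n hInv hA
    obtain ⟨h1, h2, h3⟩ := hInv
    cases QA with
    | nil => simp [bfsA] at hA
    | cons m rest =>
      have hpair : (m :: rest).map toPair = (m.val, opsOf m) :: rest.map toPair := rfl
      by_cases hv : m.val = g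
      · -- A dequeues the goal node; by the invariant it is at the head of B's queue
        have hnm : m = n := by simpa [bfsA, hv] using hA
        have hgD : g ∉ D := fun hg => ((h3 g hg).1 rfl)
        have hQB : QB = (m.val, opsOf m) :: keepF g (m.val :: D) (rest.map toPair) := by
          rw [h1, hpair, keepF, if_pos ⟨le_of_eq hv, by rw [hv]; exact hgD⟩]
        subst hnm
        refine ⟨1, by omega, ?_⟩
        rw [hQB]
        simp [bfsB, hv]
      · have hA' : bfsA g (rest ++ stepChildren m) f = some n := by
          simpa [bfsA, hv] using hA
        have hcs : (stepChildren m).map toPair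
            = [(m.val + 1, "inc"), (m.val * m.val, "sqr")].map
                (fun c => (c.1, opsOf m ++ [c.2])) := rfl
        by_cases hkeep : m.val ≤ g ∧ m.val ∉ D
        · -- active step: both BFS loops process the value m.val
          have hQB : QB = (m.val, opsOf m) :: keepF g (m.val :: D) (rest.map toPair) := by
            rw [h1, hpair, keepF, if_pos hkeep]
          have hVE1 : ∀ x : Int, x ∈ V ↔ x ∈ endEF g (m.val :: D) (rest.map toPair) := by
            intro x
            rw [h2 x, mem_endEF, hQB]
            simp only [List.map_cons, List.mem_cons]
            tauto
          obtain ⟨hq, hvis⟩ := push_keep_list g (opsOf m)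
            [(m.val + 1, "inc"), (m.val * m.val, "sqr")]
            (keepF g (m.val :: D) (rest.map toPair)) V
            (endEF g (m.val :: D) (rest.map toPair)) hVE1
          have hInv' : InvSim g (rest ++ stepChildren m)
              (List.foldl (pushB g (opsOf m))
                (keepF g (m.val :: D) (rest.map toPair), V)
                [(m.val + 1, "inc"), (m.val * m.val, "sqr")]).1
              (List.foldl (pushB g (opsOf m))
                (keepF g (m.val :: D) (rest.map toPair), V)
                [(m.val + 1, "inc"), (m.val * m.val, "sqr")]).2
              (m.val :: D) := by
            refine ⟨?_, ?_, ?_⟩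
            · rw [List.map_append, keepF_append, hq, hcs]
            · intro x
              rw [hvis x, mem_endEF, hq, mem_endEF]
              simp only [List.map_append, List.mem_append, List.mem_cons]
              tauto
            · intro w hw
              rcases List.mem_cons.1 hw with hw' | hwD
              · subst hw'
                refine ⟨hv, ?_, ?_⟩
                · by_cases hle : m.val + 1 ≤ g
                  · right
                    rw [hvis]
                    exact mem_endEF_of_le g _ _ (m.val + 1) (opsOf m ++ ["inc"]) hle (by simp)
                  · left; omega
                · by_cases hle : m.val * m.val ≤ g
                  · right
                    rw [hvis]
                    exact mem_endEF_of_le g _ _ (m.val * m.val) (opsOf m ++ ["sqr"]) hle (by simp)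
                  · left; omega
              · obtain ⟨hne, hi, hs⟩ := h3 w hwD
                refine ⟨hne, ?_, ?_⟩
                · rcases hi with h | h
                  · left; exact h
                  · right; rw [hvis]; exact endEF_subset g _ _ _ ((hVE1 _).1 h)
                · rcases hs with h | h
                  · left; exact h
                  · right; rw [hvis]; exact endEF_subset g _ _ _ ((hVE1 _).1 h)
          obtain ⟨fB, hfB, hB⟩ := ih _ _ _ (m.val :: D) n hInv' hA'
          refine ⟨fB + 1, by omega, ?_⟩
          rw [hQB]
          simp only [bfsB]
          rw [if_neg hv]
          exact hB
        · -- stale step: B has already seen this value (or it overshot); B does nothing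
          have hQB : QB = keepF g D (rest.map toPair) := by
            rw [h1, hpair, keepF, if_neg hkeep]
          have hVE0 : ∀ x : Int, x ∈ V ↔ x ∈ endEF g D (rest.map toPair) := by
            intro x; rw [h2 x, mem_endEF, hQB]
          have hstale : g < m.val ∨ m.val ∈ D := by
            rcases not_and_or.1 hkeep with h | h
            · left; omega
            · right; simpa using h
          have hc1 : ¬ (m.val + 1 ≤ g ∧ (m.val + 1) ∉ endEF g D (rest.map toPair)) := by
            rintro ⟨hle, hnot⟩
            rcases hstale with h | h
            · omega
            · rcases (h3 _ h).2.1 with h' | h'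
              · omega
              · exact hnot ((hVE0 _).1 h')
          have hc2 : ¬ (m.val * m.val ≤ g ∧ (m.val * m.val) ∉ endEF g D (rest.map toPair)) := by
            rintro ⟨hle, hnot⟩
            rcases hstale with h | h
            · have := overshoot_sqr g m.val h; omega
            · rcases (h3 _ h).2.2 with h' | h'
              · omega
              · exact hnot ((hVE0 _).1 h')
          have hInv' : InvSim g (rest ++ stepChildren m) QB V D := by
            refine ⟨?_, h2, h3⟩
            rw [List.map_append, keepF_append, hcs]
            simp only [List.map_cons, List.map_nil, keepF]
            rw [if_neg hc1, if_neg hc2]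
            rw [List.append_nil, hQB]
          obtain ⟨fB, hfB, hB⟩ := ih _ QB V D n hInv' hA'
          exact ⟨fB, by omega, hB⟩

theorem bfsB_mono (g : Int) :
    ∀ (f f' : Nat) (QB : List (Int × List String)) (V : List Int) (r : List String),
      f ≤ f' → bfsB g QB V f = some r → bfsB g QB V f' = some r := by
  intro f
  induction f with
  | zero => intro f' QB V r _ h; simp [bfsB] at h
  | succ f ih =>
    intro f' QB V r hle h
    match f' with
    | 0 => omega
    | f' + 1 =>
      match QB with
      | [] => simp [bfsB] at h
      | (v, p) :: rest =>
        simp only [bfsB] at h ⊢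
        by_cases hvg : v = g
        · rw [if_pos hvg] at h ⊢; exact h
        · rw [if_neg hvg] at h ⊢
          exact ih f' _ _ r (by omega) h

-- ---- A-side fuel sufficiency: the pure-inc chain is dequeued within 2^d steps ----

-- the dequeue stream of A's loop, ignoring the goal test
def strA : List ANode → Nat → Option ANode
  | [], _ => none
  | n :: _, 0 => some n
  | n :: rest, k + 1 => strA (rest ++ stepChildren n) k

def lvlA (n0 : ANode) : Nat → List ANode
  | 0 => [n0]
  | i + 1 => List.flatMap stepChildren (lvlA n0 i)

def chainA (n0 : ANode) : Nat → ANode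
  | 0 => n0
  | i + 1 => ANode.child ((chainA n0 i).val + 1) "inc" (chainA n0 i)

theorem strA_skip : ∀ (Q Q' : List ANode) (j : Nat),
    strA (Q ++ Q') (Q.length + j) = strA (Q' ++ List.flatMap stepChildren Q) j := by
  intro Q
  induction Q with
  | nil => intro Q' j; simp
  | cons n Q ih =>
    intro Q' j
    have h1 : (n :: Q).length + j = (Q.length + j) + 1 := by simp; omega
    rw [h1]
    show strA ((Q ++ Q') ++ stepChildren n) (Q.length + j) = _
    rw [List.append_assoc, ih (Q' ++ stepChildren n) j]
    simp [List.flatMap_cons, List.append_assoc]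

theorem length_lvlA (n0 : ANode) : ∀ i, (lvlA n0 i).length = 2 ^ i := by
  intro i
  induction i with
  | zero => rfl
  | succ i ih =>
    show (List.flatMap stepChildren (lvlA n0 i)).length = 2 ^ (i + 1)
    rw [List.length_flatMap]
    have : ∀ l : List ANode, (l.map (fun x => (stepChildren x).length)).sum = 2 * l.length := by
      intro l
      induction l with
      | nil => simp
      | cons a t iht => simp [stepChildren]; omega
    rw [this, ih]; omega

theorem strA_lvl (n0 : ANode) : ∀ (i j : Nat), strA [n0] ((2 ^ i - 1) + j) = strA (lvlA n0 i) j := by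
  intro i
  induction i with
  | zero => intro j; simp [lvlA]
  | succ i ih =>
    intro j
    have h1 : 1 ≤ 2 ^ i := Nat.one_le_two_pow
    have h2 : (2 ^ (i + 1) - 1) + j = (2 ^ i - 1) + (2 ^ i + j) := by
      rw [pow_succ]; omega
    rw [h2, ih (2 ^ i + j)]
    have h3 := strA_skip (lvlA n0 i) [] j
    rw [List.append_nil, length_lvlA] at h3
    rw [h3]
    simp [lvlA]

theorem lvlA_head (n0 : ANode) : ∀ i, ∃ t, lvlA n0 i = chainA n0 i :: t := by
  intro i
  induction i with
  | zero => exact ⟨[], rfl⟩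
  | succ i ih =>
    obtain ⟨t, ht⟩ := ih
    refine ⟨ANode.child ((chainA n0 i).val * (chainA n0 i).val) "sqr" (chainA n0 i)
        :: List.flatMap stepChildren t, ?_⟩
    show List.flatMap stepChildren (lvlA n0 i) = _
    rw [ht]
    simp [List.flatMap_cons, stepChildren, chainA]

theorem chainA_val (n0 : ANode) : ∀ i, (chainA n0 i).val = n0.val + i := by
  intro i
  induction i with
  | zero => simp [chainA]
  | succ i ih =>
    show (chainA n0 i).val + 1 = n0.val + ((i : Int) + 1)
    rw [ih]; ring

theorem bfsA_finds (g : Int) :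
    ∀ (f : Nat) (Q : List ANode),
      (∃ k < f, ∃ m : ANode, strA Q k = some m ∧ m.val = g) →
      ∃ n, bfsA g Q f = some n := by
  intro f
  induction f with
  | zero => rintro Q ⟨k, hk, _⟩; omega
  | succ f ih =>
    rintro Q ⟨k, hk, m, hm, hval⟩
    match Q with
    | [] => simp [strA] at hm
    | n :: rest =>
      by_cases hn : n.val = g
      · exact ⟨n, by simp [bfsA, hn]⟩
      · match k with
        | 0 =>
          simp only [strA] at hm
          obtain rfl : n = m := by injection hm
          exact absurd hval hn
        | k + 1 =>
          simp only [strA] at hm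
          obtain ⟨n', hn'⟩ := ih (rest ++ stepChildren n) ⟨k, by omega, m, hm, hval⟩
          exact ⟨n', by simp [bfsA, hn, hn']⟩

theorem collectUp_eq (n : ANode) : collectUp n = (opsOf n).reverse ++ [""] := by
  induction n with
  | root v => rfl
  | child v op p ih => simp [collectUp, opsOf, ih]

-- ===== VERDICT (by name: the statement is the Claim_ definition above) =====
theorem find_sequence_oo_spec : Claim_equal_find_sequence_oo := by
  unfold Claim_equal_find_sequence_oo
  intro initial goal _ hPre
  unfold Pre_find_sequence_oo at hPre
  unfold Spec_find_sequence_oo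
  set d := (goal - initial).toNat with hd
  -- the pure-inc chain of length d reaches the goal and is dequeued by A at step 2^d - 1
  have hchain : strA [ANode.root initial] (2 ^ d - 1) = some (chainA (ANode.root initial) d) := by
    have h0 := strA_lvl (ANode.root initial) d 0
    rw [Nat.add_zero] at h0
    rw [h0]
    obtain ⟨t, ht⟩ := lvlA_head (ANode.root initial) d
    rw [ht, strA]
  have hval : (chainA (ANode.root initial) d).val = goal := by
    rw [chainA_val]
    show initial + (d : Int) = goal
    omega
  obtain ⟨n, hA⟩ := bfsA_finds goal (2 ^ d) [ANode.root initial]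
    ⟨2 ^ d - 1, by have := Nat.one_le_two_pow (n := d); omega, _, hchain, hval⟩
  -- the initial states of the two loops satisfy the simulation invariant
  have hInv0 : InvSim goal [ANode.root initial] [(initial, [])] (PySem.Set.ofList [initial]) [] := by
    refine ⟨?_, ?_, ?_⟩
    · show [(initial, [])] = keepF goal [] [(initial, [])]
      rw [keepF, if_pos ⟨hPre, by simp⟩]
      rfl
    · intro x
      rw [PySem.Set.mem_ofList]
      simp
    · intro v hv
      simp at hv
  obtain ⟨fB, hfB, hB⟩ := sim goal (2 ^ d) _ _ _ _ n hInv0 hA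
  have hB' : bfsB goal [(initial, [])] (PySem.Set.ofList [initial]) (2 ^ d) = some (opsOf n) :=
    bfsB_mono goal fB (2 ^ d) _ _ _ hfB hB
  unfold find_sequence_oo find_sequence_oo_alt
  rw [← hd, hA, hB']
  simp only [collectUp_eq]
  simp
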